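-- pv_equiv track=rewrite | github.com/Stephen-Abkin-TAMU/ZLP-Scheduler | zlp_scheduler.py | offenders_for_start
-- ===== SOURCE A (Python) =====
-- from typing import Dict, List, Tuple
--
-- BLOCK_LEN   = 100                              # 100-minute window
--
-- def overlaps(a:Tuple[int,int], b:Tuple[int,int]) -> bool:
--     return max(a[0],b[0]) < min(a[1],b[1])     # half-open
--
-- def offenders_for_start(st:int, day_labeled:List[Tuple[int,int,str]])->List[Tuple[str,int,int]]:
--     """Return all (code, start_min, end_min) classes overlapping a block."""
--     blk=(st, st+BLOCK_LEN)
--     hits=[]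
--     for s,e,code in day_labeled:
--         if overlaps((s,e), blk):
--             hits.append((code, s, e))
--     hits.sort(key=lambda x: x[1])
--     return hits
-- ===== SOURCE B (Python) =====
-- BLOCK_LEN = 100
--
-- def offenders_for_start(st, day_labeled):
--     """Single fused pass: each overlapping class is placed directly at its
--     sorted position by a hand-rolled right-bisect insertion, so the output
--     is built already ordered and no sort() call is made."""
--     end = st + BLOCK_LEN
--     out = []
--     for s, e, code in day_labeled:
--         if s < e and s < end and st < e:
--             lo, hi = 0, len(out)
--             while lo < hi:
--                 mid = (lo + hi) // 2
--                 if out[mid][1] <= s: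
--                     lo = mid + 1
--                 else:
--                     hi = mid
--             out.insert(lo, (code, s, e))
--     return out
-- ===== Notes on version B (the rewrite author's own statement) =====
-- stated objective: alternative
-- what changed: B replaces A's collect-then-sort() with a single fused pass that keeps its output permanently sorted: each overlapping class is placed directly at its position by a hand-rolled right-bisect (binary search) insertion, so no sort call exists and the overlap test is expanded into plain inequalities.
import Mathlib
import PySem

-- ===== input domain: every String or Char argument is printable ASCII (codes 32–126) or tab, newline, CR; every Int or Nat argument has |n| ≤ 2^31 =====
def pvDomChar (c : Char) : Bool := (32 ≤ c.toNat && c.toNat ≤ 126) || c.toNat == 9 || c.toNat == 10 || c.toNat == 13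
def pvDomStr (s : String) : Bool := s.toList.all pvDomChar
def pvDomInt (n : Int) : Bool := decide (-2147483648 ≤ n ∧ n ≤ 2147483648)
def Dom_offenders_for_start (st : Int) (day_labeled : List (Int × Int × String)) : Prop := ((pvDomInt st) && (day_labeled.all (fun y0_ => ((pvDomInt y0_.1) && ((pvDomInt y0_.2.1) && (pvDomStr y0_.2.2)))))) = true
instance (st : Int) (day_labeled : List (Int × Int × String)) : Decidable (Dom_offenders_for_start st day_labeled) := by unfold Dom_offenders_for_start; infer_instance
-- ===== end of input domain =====

-- B builds the result already sorted in one fused pass, placing each overlapping class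
-- at its position by a hand-rolled right-bisect insertion (no sort call); same cost class.

-- ===== PORT A =====
def BLOCK_LEN : Int := 100

def overlaps (a : Int × Int) (b : Int × Int) : Bool :=
  decide (max a.1 b.1 < min a.2 b.2)

def offenders_for_start (st : Int) (day_labeled : List (Int × Int × String)) : List (String × Int × Int) :=
  let blk : Int × Int := (st, st + BLOCK_LEN)
  let hits : List (String × Int × Int) :=
    day_labeled.foldl (fun acc t =>
      if overlaps (t.1, t.2.1) blk then acc ++ [(t.2.2, t.1, t.2.1)] else acc) []
  PySem.List.sorted hits (fun x => x.2.1) false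

-- ===== PORT B =====
-- the while-loop of Source B; out[mid] is in range whenever the loop body runs
-- (lo ≤ mid < hi ≤ len(out)), so getD here computes Python's out[mid] exactly
def bsLoop (out : List (String × Int × Int)) (s : Int) (lo hi : Nat) : Nat :=
  if lo < hi then
    let mid := (lo + hi) / 2
    if (out.getD mid ("", 0, 0)).2.1 ≤ s then bsLoop out s (mid + 1) hi
    else bsLoop out s lo mid
  else lo
termination_by hi - lo
decreasing_by all_goals omega

def offenders_for_start_alt (st : Int) (day_labeled : List (Int × Int × String)) : List (String × Int × Int) :=
  let «end» : Int := st + BLOCK_LEN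
  day_labeled.foldl (fun out t =>
    if decide (t.1 < t.2.1) && decide (t.1 < «end») && decide (st < t.2.1) then
      PySem.List.insert out ((bsLoop out t.1 0 out.length : Nat) : Int) (t.2.2, t.1, t.2.1)
    else out) []

-- ===== PRECONDITION & SPEC =====
def Spec_offenders_for_start (st : Int) (day_labeled : List (Int × Int × String)) (out : List (String × Int × Int)) : Prop := out = offenders_for_start_alt st day_labeled
instance (st : Int) (day_labeled : List (Int × Int × String)) (out : List (String × Int × Int)) : Decidable (Spec_offenders_for_start st day_labeled out) := by unfold Spec_offenders_for_start; infer_instance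

-- ===== CLAIM =====
def Claim_equal_offenders_for_start : Prop := ∀ (st : Int) (day_labeled : List (Int × Int × String)), Dom_offenders_for_start st day_labeled → Spec_offenders_for_start st day_labeled (offenders_for_start st day_labeled)

-- ===== LEMMAS AND PROOFS =====

-- on a key-sorted list, "key ≤ s" holds exactly on the takeWhile-prefix
theorem keyLe_iff_lt_tw (s : Int) (l : List (String × Int × Int))
    (hs : l.Pairwise (fun a b => a.2.1 ≤ b.2.1)) (i : Nat) (hi : i < l.length) :
    (l[i].2.1 ≤ s ↔ i < (l.takeWhile (fun y => decide (y.2.1 ≤ s))).length) := by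
  have hpre := List.takeWhile_prefix (l := l) (fun y => decide (y.2.1 ≤ s))
  have htw : (l.takeWhile (fun y => decide (y.2.1 ≤ s))).length ≤ l.length := hpre.length_le
  set tw := (l.takeWhile (fun y => decide (y.2.1 ≤ s))).length with htwdef
  constructor
  · intro h
    by_contra hge
    rw [not_lt] at hge
    have htwlt : tw < l.length := lt_of_le_of_lt hge hi
    have hdrop : l.drop tw = l.dropWhile (fun y => decide (y.2.1 ≤ s)) := by
      conv_lhs => rw [← List.takeWhile_append_dropWhile (p := fun y => decide (y.2.1 ≤ s)) (l := l)]
      exact List.drop_left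
    have hne : l.dropWhile (fun y => decide (y.2.1 ≤ s)) ≠ [] := by
      intro h0
      rw [h0, List.drop_eq_nil_iff] at hdrop
      omega
    have hhead := List.head_dropWhile_not (fun y : String × Int × Int => decide (y.2.1 ≤ s)) hne
    have hheadel : (l.dropWhile (fun y => decide (y.2.1 ≤ s))).head? = some l[tw] := by
      rw [← hdrop, List.head?_drop, List.getElem?_eq_getElem htwlt]
    rw [List.head?_eq_some_head hne] at hheadel
    rw [Option.some.injEq] at hheadel
    rw [hheadel] at hhead
    have hstw : s < l[tw].2.1 := by simpa using hhead
    rcases Nat.lt_or_ge tw i with hlt | hge'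
    · have := (List.pairwise_iff_getElem.mp hs) tw i htwlt hi hlt
      omega
    · have : tw = i := by omega
      subst this; omega
  · intro h
    have h1 : (l.takeWhile (fun y => decide (y.2.1 ≤ s)))[i]'(h) = l[i] := hpre.getElem h
    have h2 : (l.takeWhile (fun y => decide (y.2.1 ≤ s)))[i]'(h) ∈ l.takeWhile (fun y => decide (y.2.1 ≤ s)) :=
      List.getElem_mem _
    have := List.mem_takeWhile_imp h2
    rw [h1] at this
    simpa using this

-- the hand-rolled binary search lands exactly at the takeWhile boundary
theorem bsLoop_eq (s : Int) (l : List (String × Int × Int))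
    (hs : l.Pairwise (fun a b => a.2.1 ≤ b.2.1)) :
    ∀ (n lo hi : Nat), hi - lo = n → hi ≤ l.length →
      lo ≤ (l.takeWhile (fun y => decide (y.2.1 ≤ s))).length →
      (l.takeWhile (fun y => decide (y.2.1 ≤ s))).length ≤ hi →
      bsLoop l s lo hi = (l.takeWhile (fun y => decide (y.2.1 ≤ s))).length := by
  intro n
  induction n using Nat.strong_induction_on with
  | _ n ih =>
    intro lo hi hn h1 h2 h3
    rw [bsLoop]
    split
    · next hlt =>
      have hmlo : lo ≤ (lo + hi) / 2 := by omega
      have hmhi : (lo + hi) / 2 < hi := by omega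
      have hmlen : (lo + hi) / 2 < l.length := by omega
      have hiff := keyLe_iff_lt_tw s l hs ((lo + hi) / 2) hmlen
      show (if (l.getD ((lo + hi) / 2) ("", 0, 0)).2.1 ≤ s then bsLoop l s ((lo + hi) / 2 + 1) hi
            else bsLoop l s lo ((lo + hi) / 2)) = _
      rw [List.getD_eq_getElem l _ hmlen]
      split
      · next hle =>
        have hm := hiff.mp hle
        exact ih (hi - ((lo + hi) / 2 + 1)) (by omega) ((lo + hi) / 2 + 1) hi rfl h1 (by omega) h3
      · next hgt =>
        have hm : ¬ ((lo + hi) / 2 < (List.takeWhile (fun y => decide (y.2.1 ≤ s)) l).length) :=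
          fun hc => hgt (hiff.mpr hc)
        exact ih ((lo + hi) / 2 - lo) (by omega) lo ((lo + hi) / 2) rfl (by omega) h2 (by omega)
    · next hnlt => omega

-- insertBy with the key-lt test is the takeWhile/dropWhile split at the key
theorem insertBy_eq_takeWhile_dropWhile (x : String × Int × Int) (l : List (String × Int × Int)) :
    PySem.List.insertBy (fun a b => decide (a.2.1 < b.2.1)) x l =
      l.takeWhile (fun y => decide (y.2.1 ≤ x.2.1)) ++ x :: l.dropWhile (fun y => decide (y.2.1 ≤ x.2.1)) := by
  induction l with
  | nil => simp [PySem.List.insertBy]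
  | cons y ys ih =>
    by_cases h : x.2.1 < y.2.1
    · simp [PySem.List.insertBy, h, not_le.mpr h]
    · simp [PySem.List.insertBy, h, not_lt.mp h, ih]

-- bisect-position insertion into a key-sorted list is exactly the stable sorted insertion
theorem insert_bsLoop_eq_insertBy (x : String × Int × Int) (l : List (String × Int × Int))
    (hs : l.Pairwise (fun a b => a.2.1 ≤ b.2.1)) :
    PySem.List.insert l ((bsLoop l x.2.1 0 l.length : Nat) : Int) x =
      PySem.List.insertBy (fun a b => decide (a.2.1 < b.2.1)) x l := by
  have hpre := List.takeWhile_prefix (l := l) (fun y => decide (y.2.1 ≤ x.2.1))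
  have htw : (l.takeWhile (fun y => decide (y.2.1 ≤ x.2.1))).length ≤ l.length := hpre.length_le
  rw [bsLoop_eq x.2.1 l hs (l.length - 0) 0 l.length rfl le_rfl (Nat.zero_le _) htw,
      PySem.List.insert_natCast l _ x htw, insertBy_eq_takeWhile_dropWhile]
  congr 1
  · exact (List.prefix_iff_eq_take.mp hpre).symm
  · congr 1
    have h := List.drop_left (l₁ := l.takeWhile (fun y => decide (y.2.1 ≤ x.2.1)))
      (l₂ := l.dropWhile (fun y => decide (y.2.1 ≤ x.2.1)))
    rw [List.takeWhile_append_dropWhile] at h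
    exact h

-- insertBy with the key-lt test keeps a key-nondecreasing list key-nondecreasing
theorem insertBy_pairwise (x : String × Int × Int) (l : List (String × Int × Int))
    (h : l.Pairwise (fun a b => a.2.1 ≤ b.2.1)) :
    (PySem.List.insertBy (fun a b => decide (a.2.1 < b.2.1)) x l).Pairwise (fun a b => a.2.1 ≤ b.2.1) := by
  induction l with
  | nil => simp [PySem.List.insertBy]
  | cons y ys ih =>
    rcases List.pairwise_cons.mp h with ⟨hy, hys⟩
    by_cases hlt : x.2.1 < y.2.1
    · simp only [PySem.List.insertBy, hlt, decide_true, if_true]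
      refine List.pairwise_cons.mpr ⟨?_, h⟩
      intro z hz
      rcases List.mem_cons.mp hz with rfl | hz
      · omega
      · have := hy z hz; omega
    · simp only [PySem.List.insertBy, hlt, decide_false]
      refine List.pairwise_cons.mpr ⟨?_, ih hys⟩
      intro z hz
      rcases (PySem.List.mem_insertBy _ _ _ _).mp hz with rfl | hz
      · omega
      · exact hy z hz

-- B's fused loop equals the insertBy fold over the filtered list
theorem foldl_B_eq (st : Int) (e : Int) (xs : List (Int × Int × String)) :
    ∀ acc, acc.Pairwise (fun a b => a.2.1 ≤ b.2.1) →
      xs.foldl (fun out t =>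
        if decide (t.1 < t.2.1) && decide (t.1 < e) && decide (st < t.2.1) then
          PySem.List.insert out ((bsLoop out t.1 0 out.length : Nat) : Int) (t.2.2, t.1, t.2.1)
        else out) acc =
      (xs.filter (fun t => decide (t.1 < t.2.1) && decide (t.1 < e) && decide (st < t.2.1))).foldl
        (fun out t => PySem.List.insertBy (fun a b => decide (a.2.1 < b.2.1)) (t.2.2, t.1, t.2.1) out) acc := by
  induction xs with
  | nil => intro acc _; rfl
  | cons t ts ih =>
    intro acc hacc
    by_cases hp : (decide (t.1 < t.2.1) && decide (t.1 < e) && decide (st < t.2.1)) = true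
    · simp only [List.foldl_cons, List.filter_cons, hp]
      rw [insert_bsLoop_eq_insertBy (t.2.2, t.1, t.2.1) acc hacc]
      exact ih _ (insertBy_pairwise _ _ hacc)
    · have hp' : (decide (t.1 < t.2.1) && decide (t.1 < e) && decide (st < t.2.1)) = false := by
        simpa using hp
      simp only [List.foldl_cons, List.filter_cons, hp', Bool.false_eq_true, if_false]
      exact ih _ hacc

-- ===== VERDICT =====
theorem offenders_for_start_spec : Claim_equal_offenders_for_start := by
  intro st xs _
  unfold Spec_offenders_for_start offenders_for_start offenders_for_start_alt
  simp only []
  rw [PySem.List.foldl_append_if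
        (p := fun t : Int × Int × String => overlaps (t.1, t.2.1) (st, st + BLOCK_LEN))
        (f := fun t : Int × Int × String => (t.2.2, t.1, t.2.1))]
  rw [foldl_B_eq st (st + BLOCK_LEN) xs [] (by simp)]
  rw [PySem.List.sorted_eq_foldl_insertBy, List.nil_append, List.foldl_map]
  have hpq : ∀ t ∈ xs, (overlaps (t.1, t.2.1) (st, st + BLOCK_LEN))
      = (decide (t.1 < t.2.1) && decide (t.1 < st + BLOCK_LEN) && decide (st < t.2.1)) := by
    intro t _
    simp only [overlaps, BLOCK_LEN, ← Bool.decide_and]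
    apply decide_eq_decide.mpr
    omega
  rw [List.filter_congr hpq]
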